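-- pv_equiv track=rewrite | github.com/MOX233/Meet-Cobra | utils/alg_utils.py | update_BS_association_state
-- ===== SOURCE A (Python) =====
-- import collections
--
-- def update_BS_association_state(BS_dict, connection_dict):
--     BS_association_dict = collections.OrderedDict()
--     BS_association_num = collections.OrderedDict()
--     for k, _ in BS_dict.items():
--         BS_association_dict[k] = []
--         BS_association_num[k] = 0
--     for k, v in connection_dict.items():
--         BS_association_dict[v].append(k)
--         BS_association_num[v] += 1
--     return BS_association_dict, BS_association_num
-- ===== SOURCE B (Python) =====
-- import collections
--
-- def update_BS_association_state(BS_dict, connection_dict):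
--     # Tally pass first: the num dict, keyed by the BS keys, both validates each
--     # connection's base station (KeyError on an unknown one) and counts it.
--     BS_association_num = collections.OrderedDict((b, 0) for b in BS_dict)
--     for v in connection_dict.values():
--         BS_association_num[v] += 1
--     # Grouping built declaratively per BS key, by filtering that BS's connections.
--     BS_association_dict = collections.OrderedDict(
--         (b, [k for k, v in connection_dict.items() if v == b]) for b in BS_dict)
--     return BS_association_dict, BS_association_num
-- ===== Notes on version B (the rewrite author's own statement) =====
-- stated objective: alternative
-- what changed: B inverts the construction of the grouping: instead of A's single pass over connections appending into pre-initialized per-BS lists alongside the counter, B builds each BS's group directly as a filter comprehension over the connections (one scan per BS key), and computes the counts in a separate plain tally pass over the connection values; trade-off is O(n*m) grouping work for a loop-free, declarative construction.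
import Mathlib
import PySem

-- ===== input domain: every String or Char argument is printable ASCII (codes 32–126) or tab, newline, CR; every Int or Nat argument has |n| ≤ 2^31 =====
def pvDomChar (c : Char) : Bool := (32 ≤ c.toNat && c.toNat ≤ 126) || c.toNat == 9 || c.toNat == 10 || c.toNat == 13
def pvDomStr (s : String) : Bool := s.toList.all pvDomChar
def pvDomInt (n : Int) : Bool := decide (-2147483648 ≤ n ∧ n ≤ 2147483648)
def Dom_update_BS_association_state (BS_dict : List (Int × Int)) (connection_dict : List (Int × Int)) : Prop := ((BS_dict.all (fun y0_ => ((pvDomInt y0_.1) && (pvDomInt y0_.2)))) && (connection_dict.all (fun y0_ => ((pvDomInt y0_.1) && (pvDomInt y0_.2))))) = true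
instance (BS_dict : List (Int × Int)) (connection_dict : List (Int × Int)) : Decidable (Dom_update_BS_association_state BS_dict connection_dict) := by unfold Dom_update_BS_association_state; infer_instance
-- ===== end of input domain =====

-- B builds the grouping declaratively, one filter scan of the connections per
-- BS key, and the counts in a separate plain tally pass, instead of A's single
-- pass appending into pre-initialized containers (objective: alternative).

-- ===== PORT A =====
-- init loop builds two parallel dicts; the populating loop updates both per
-- connection. `BS_association_dict[v].append(k)` / `+= 1` are exact inside Pre_
-- (v a key of BS_dict); where Python raises KeyError, Pre_ excludes the input.
def update_BS_association_state (BS_dict : List (Int × Int)) (connection_dict : List (Int × Int)) : (List (Int × List Int)) × (List (Int × Int)) :=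
  let init : PySem.Dict Int (List Int) × PySem.Dict Int Int :=
    BS_dict.foldl (fun st kv => (st.1.insert kv.1 ([] : List Int), st.2.insert kv.1 (0 : Int)))
      (PySem.Dict.empty, PySem.Dict.empty)
  let fin :=
    connection_dict.foldl
      (fun st kv => (st.1.modify kv.2 [] (fun l => l ++ [kv.1]), st.2.modify kv.2 0 (· + 1)))
      init
  (fin.1.items, fin.2.items)

-- ===== PORT B =====
-- tally pass over connection values into the zero-initialized num dict
-- (`BS_association_num[v] += 1` is exact inside Pre_; KeyError outside), then
-- the grouping per BS key as the comprehension [k for k, v in conn if v == b].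
def update_BS_association_state_alt (BS_dict : List (Int × Int)) (connection_dict : List (Int × Int)) : (List (Int × List Int)) × (List (Int × Int)) :=
  let n0 : PySem.Dict Int Int :=
    BS_dict.foldl (fun d kv => d.insert kv.1 (0 : Int)) PySem.Dict.empty
  let n := connection_dict.foldl (fun d c => d.modify c.2 0 (· + 1)) n0
  let grp : Int → List Int := fun b =>
    connection_dict.foldl (fun acc c => if c.2 == b then acc ++ [c.1] else acc) []
  let d := BS_dict.foldl (fun d kv => d.insert kv.1 (grp kv.1)) PySem.Dict.empty
  (d.items, n.items)

-- ===== PRECONDITION & SPEC =====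
-- Pre_ excludes exactly the inputs on which Python A raises KeyError: a
-- connection value that is not a key of BS_dict.
def Pre_update_BS_association_state (BS_dict : List (Int × Int)) (connection_dict : List (Int × Int)) : Prop :=
  (connection_dict.all (fun p => BS_dict.any (fun q => q.1 == p.2))) = true
instance (BS_dict : List (Int × Int)) (connection_dict : List (Int × Int)) : Decidable (Pre_update_BS_association_state BS_dict connection_dict) := by unfold Pre_update_BS_association_state; infer_instance

def pvWitness_update_BS_association_state : (List (Int × Int)) × (List (Int × Int)) :=
  ([(1, 0), (2, 0)], [(5, 1), (6, 1), (7, 2)])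

def Spec_update_BS_association_state (BS_dict : List (Int × Int)) (connection_dict : List (Int × Int)) (out : (List (Int × List Int)) × (List (Int × Int))) : Prop := out = update_BS_association_state_alt BS_dict connection_dict
instance (BS_dict : List (Int × Int)) (connection_dict : List (Int × Int)) (out : (List (Int × List Int)) × (List (Int × Int))) : Decidable (Spec_update_BS_association_state BS_dict connection_dict out) := by unfold Spec_update_BS_association_state; infer_instance

-- ===== CLAIM (what is proved, stated in full; the proofs are below) =====
def Claim_equal_update_BS_association_state : Prop := ∀ (BS_dict : List (Int × Int)) (connection_dict : List (Int × Int)), Dom_update_BS_association_state BS_dict connection_dict → Pre_update_BS_association_state BS_dict connection_dict → Spec_update_BS_association_state BS_dict connection_dict (update_BS_association_state BS_dict connection_dict)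


-- ===== LEMMAS AND PROOFS =====

-- updating a set with elements it already contains leaves it unchanged
theorem pv_update_of_subset {s : PySem.Set Int} {xs : List Int}
    (h : ∀ x ∈ xs, x ∈ s) : PySem.Set.update s xs = s := by
  rw [PySem.Set.update_eq_append_filter]
  have : (PySem.Set.ofList xs).filter (fun y => !(PySem.Set.contains s y)) = [] := by
    apply List.filter_eq_nil_iff.mpr
    intro y hy
    have : y ∈ s := h y ((PySem.Set.mem_ofList _ _).mp hy)
    simp [PySem.Set.contains_eq_listContains, this]
  rw [this, List.append_nil]

-- a fold of constant-value inserts never changes the default lookup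
theorem pv_getD_foldl_insert_const {α : Type} (c : α) (BS : List (Int × Int)) (k : Int) :
    ∀ (d : PySem.Dict Int α), d.getD k c = c →
      (BS.foldl (fun d kv => d.insert kv.1 c) d).getD k c = c := by
  induction BS with
  | nil => intro d h; simpa using h
  | cons kv BS ih =>
    intro d h
    simp only [List.foldl_cons]
    apply ih
    rw [PySem.Dict.getD_insert]
    split_ifs <;> simp [h]

-- a fold of inserts whose value is a function of the key
theorem pv_getD_foldl_insert_fun {α : Type} (f : Int → α) (dflt : α)
    (BS : List (Int × Int)) (k : Int) :
    ∀ (d : PySem.Dict Int α),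
      (BS.foldl (fun d kv => d.insert kv.1 (f kv.1)) d).getD k dflt
        = if k ∈ BS.map (fun q => q.1) then f k else d.getD k dflt := by
  induction BS with
  | nil => intro d; simp
  | cons kv BS ih =>
    intro d
    simp only [List.foldl_cons, List.map_cons, List.mem_cons]
    rw [ih]
    rw [PySem.Dict.getD_insert]
    by_cases hmem : k ∈ BS.map (fun q => q.1)
    · simp [hmem]
    · by_cases hk : k = kv.1
      · subst hk; simp [hmem]
      · simp [hmem, hk]

-- ===== VERDICT (by name: the statement is the Claim_ definition above) =====
theorem update_BS_association_state_spec : Claim_equal_update_BS_association_state := by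
  unfold Claim_equal_update_BS_association_state
  intro BS conn _ hpre
  unfold Spec_update_BS_association_state
  unfold Pre_update_BS_association_state at hpre
  dsimp only [update_BS_association_state, update_BS_association_state_alt]
  rw [PySem.List.foldl_prod_mk
    (f := fun (d : PySem.Dict Int (List Int)) (kv : Int × Int) => d.insert kv.1 ([] : List Int))
    (g := fun (d : PySem.Dict Int Int) (kv : Int × Int) => d.insert kv.1 (0 : Int))]
  rw [PySem.List.foldl_prod_mk
    (f := fun (d : PySem.Dict Int (List Int)) (kv : Int × Int) => d.modify kv.2 [] (fun l => l ++ [kv.1]))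
    (g := fun (d : PySem.Dict Int Int) (kv : Int × Int) => d.modify kv.2 0 (· + 1))]
  -- the num components are the same fold on both sides; only the groupings differ
  refine Prod.ext ?_ rfl
  set dA1 := BS.foldl (fun (d : PySem.Dict Int (List Int)) kv => d.insert kv.1 ([] : List Int)) PySem.Dict.empty with hdA1
  set dA := conn.foldl (fun (d : PySem.Dict Int (List Int)) kv => d.modify kv.2 [] (fun l => l ++ [kv.1])) dA1 with hdA
  set grp : Int → List Int := fun b => conn.foldl (fun acc c => if c.2 == b then acc ++ [c.1] else acc) [] with hgrp
  set dB := BS.foldl (fun (d : PySem.Dict Int (List Int)) kv => d.insert kv.1 (grp kv.1)) PySem.Dict.empty with hdB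
  -- the common key list
  have hsub : ∀ x ∈ conn.map (fun p => p.2), x ∈ BS.map (fun q => q.1) := by
    intro x hx
    rcases List.mem_map.mp hx with ⟨p, hp, rfl⟩
    have := List.all_eq_true.mp hpre p hp
    rcases (by simpa using this : ∃ y, (p.2, y) ∈ BS) with ⟨y, hy⟩
    exact List.mem_map.mpr ⟨(p.2, y), hy, rfl⟩
  have hkA1 : dA1.keys = PySem.Set.ofList (BS.map (fun q => q.1)) := by
    rw [hdA1, PySem.Dict.keys_foldl_insert_key (key := fun kv : Int × Int => kv.1)]
    simp [PySem.Set.update_nil_left]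
  have hkdA : dA.keys = PySem.Set.ofList (BS.map (fun q => q.1)) := by
    rw [hdA, PySem.Dict.keys_foldl_modify_key (key := fun kv : Int × Int => kv.2), hkA1]
    exact pv_update_of_subset (fun x hx => (PySem.Set.mem_ofList _ _).mpr (hsub x hx))
  have hkdB : dB.keys = PySem.Set.ofList (BS.map (fun q => q.1)) := by
    rw [hdB, PySem.Dict.keys_foldl_insert_key (key := fun kv : Int × Int => kv.1)]
    simp [PySem.Set.update_nil_left]
  have hndA : dA.keys.Nodup := by
    rw [hkdA]; exact PySem.Set.nodup_ofList _
  have hndB : dB.keys.Nodup := by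
    rw [hkdB]; exact PySem.Set.nodup_ofList _
  -- the values at each common key
  have hvalsA : ∀ k, dA.getD k [] = dA1.getD k [] ++ (conn.filter (fun c => c.2 == k)).map (fun c => c.1) := by
    intro k
    have hmap : dA = (conn.map (fun c => (c.2, c.1))).foldl
        (fun (d : PySem.Dict Int (List Int)) p => d.modify p.1 [] (fun l => l ++ [p.2])) dA1 := by
      rw [hdA, List.foldl_map]
    rw [hmap, PySem.Dict.getD_foldl_modify_append]
    simp [List.filter_map, List.map_map, Function.comp_def]
  have hgrpval : ∀ k, grp k = (conn.filter (fun c => c.2 == k)).map (fun c => c.1) := by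
    intro k
    simp only [hgrp]
    simpa using PySem.List.foldl_append_if (l := conn) (p := fun c : Int × Int => c.2 == k)
      (f := fun c : Int × Int => c.1) (acc := [])
  -- conclude via items_eq_map_keys
  rw [PySem.Dict.items_eq_map_keys dA hndA [], PySem.Dict.items_eq_map_keys dB hndB [],
    hkdA, hkdB]
  apply List.map_congr_left
  intro k hk
  have hkmem : k ∈ BS.map (fun q => q.1) := (PySem.Set.mem_ofList _ _).mp hk
  have hB : dB.getD k [] = grp k := by
    rw [hdB, pv_getD_foldl_insert_fun]
    simp [hkmem]
  have h1 : dA1.getD k [] = [] :=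
    pv_getD_foldl_insert_const [] BS k PySem.Dict.empty (by simp)
  rw [hvalsA k, hB, hgrpval k, h1, List.nil_append]
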